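-- pv_equiv track=rewrite | github.com/Strelix/Revise-it | classes/Login.py | __pin_validation
-- ===== SOURCE A (Python) =====
-- def __pin_validation(pin):
--     """RETURNS TRUE IF PIN IS VALID, ELSE FALSE"""
--     letter = False
--     number = False
--     for i in pin:
--         if letter and number: break
--         if i.isnumeric():
--             number = True
--         if i.isalpha():
--             letter = True
--     if letter and number:
--         return True
--     return False
-- ===== SOURCE B (Python) =====
-- def __pin_validation(pin):
--     """RETURNS TRUE IF PIN IS VALID, ELSE FALSE"""
--     # Scan to the FIRST character that is a letter or a digit; before it there is
--     # neither, so the answer reduces to one existence check for the OTHER class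
--     # in the remainder of the string.
--     for i, c in enumerate(pin):
--         if c.isalpha():
--             return any(ch.isnumeric() for ch in pin[i + 1:])
--         if c.isnumeric():
--             return any(ch.isalpha() for ch in pin[i + 1:])
--     return False
-- ===== Notes on version B (the rewrite author's own statement) =====
-- stated objective: alternative
-- what changed: Instead of accumulating two boolean flags over the whole string, B scans only to the first letter-or-digit character and then reduces the problem to a single existence check for the complementary class in the rest of the string.
import Mathlib
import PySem

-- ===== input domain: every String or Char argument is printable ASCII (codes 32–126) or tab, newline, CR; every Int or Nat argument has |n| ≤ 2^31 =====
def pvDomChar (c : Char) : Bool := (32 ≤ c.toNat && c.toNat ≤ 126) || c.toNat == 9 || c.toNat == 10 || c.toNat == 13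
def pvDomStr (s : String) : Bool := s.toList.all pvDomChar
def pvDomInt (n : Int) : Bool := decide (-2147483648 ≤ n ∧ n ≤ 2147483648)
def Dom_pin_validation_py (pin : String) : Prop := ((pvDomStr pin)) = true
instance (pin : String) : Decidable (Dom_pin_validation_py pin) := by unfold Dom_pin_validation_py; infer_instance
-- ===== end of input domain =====

-- B scans only to the FIRST letter-or-digit character and then does one existence
-- check for the complementary class in the remainder (alternative decomposition).
-- On the printable-ASCII domain Python's str.isnumeric coincides with PySem.Chars.isdigit.

-- ===== PORT A =====
-- A's for-loop: state (letter, number), with 'if letter and number: break'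
def pinLoopA : List Char → Bool → Bool → Bool × Bool
  | [], letter, number => (letter, number)
  | c :: rest, letter, number =>
      if letter && number then (letter, number)
      else pinLoopA rest (letter || PySem.Chars.isalpha c) (number || PySem.Chars.isdigit c)

def pin_validation_py (pin : String) : Bool :=
  let st := pinLoopA pin.toList false false
  if st.1 && st.2 then true else false

-- ===== PORT B =====
-- B's loop with early returns: recursion on the remaining characters;
-- pin[i+1:] at position i is exactly the tail 'rest'.
def pinScanB : List Char → Bool
  | [] => false
  | c :: rest =>
      if PySem.Chars.isalpha c then rest.any (fun ch => PySem.Chars.isdigit ch)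
      else if PySem.Chars.isdigit c then rest.any (fun ch => PySem.Chars.isalpha ch)
      else pinScanB rest

def pin_validation_py_alt (pin : String) : Bool := pinScanB pin.toList

-- ===== PRECONDITION & SPEC =====
def Spec_pin_validation_py (pin : String) (out : Bool) : Prop := out = pin_validation_py_alt pin
instance (pin : String) (out : Bool) : Decidable (Spec_pin_validation_py pin out) := by unfold Spec_pin_validation_py; infer_instance

-- ===== CLAIM (what is proved, stated in full; the proofs are below) =====
def Claim_equal_pin_validation_py : Prop := ∀ (pin : String), Dom_pin_validation_py pin → Spec_pin_validation_py pin (pin_validation_py pin)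

-- ===== LEMMAS AND PROOFS =====
theorem alpha_not_digit (c : Char) (h : PySem.Chars.isalpha c = true) :
    PySem.Chars.isdigit c = false := by
  unfold PySem.Chars.isalpha PySem.Chars.isupper PySem.Chars.islower PySem.Chars.isdigit at *
  simp [Char.le_def, UInt32.le_iff_toNat_le] at *
  omega

theorem pinLoopA_and (cs : List Char) : ∀ (l n : Bool),
    ((pinLoopA cs l n).1 && (pinLoopA cs l n).2)
      = ((l || cs.any (fun c => PySem.Chars.isalpha c)) &&
         (n || cs.any (fun c => PySem.Chars.isdigit c))) := by
  induction cs with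
  | nil => intro l n; simp [pinLoopA]
  | cons c rest ih =>
    intro l n
    by_cases h : l && n
    · rcases Bool.and_eq_true .. |>.mp h with ⟨hl, hn⟩
      simp [pinLoopA, hl, hn]
    · simp only [pinLoopA]
      rw [if_neg (by simp [h])]
      rw [ih]
      simp [List.any_cons, Bool.or_assoc]

theorem pinScanB_any (cs : List Char) :
    pinScanB cs = ((cs.any (fun c => PySem.Chars.isalpha c)) &&
                   (cs.any (fun c => PySem.Chars.isdigit c))) := by
  induction cs with
  | nil => simp [pinScanB]
  | cons c rest ih =>
    by_cases ha : PySem.Chars.isalpha c = true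
    · simp [pinScanB, ha, alpha_not_digit c ha]
    · by_cases hd : PySem.Chars.isdigit c = true
      · simp [pinScanB, ha, hd]
      · simp [pinScanB, ha, hd, ih]

-- ===== VERDICT (by name: the statement is the Claim_ definition above) =====
theorem pin_validation_py_spec : Claim_equal_pin_validation_py := by
  intro pin _
  unfold Spec_pin_validation_py pin_validation_py pin_validation_py_alt
  have h := pinLoopA_and pin.toList false false
  simp only [Bool.false_or] at h
  rw [pinScanB_any]
  simp only [← h]
  split_ifs with hc <;> simp_all
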